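-- pv_equiv track=rewrite | github.com/ABrasburg/TDA-respuestas | Examenes/2023c1-3/Ej2.py | _max_cant_personas_mesa
-- ===== SOURCE A (Python) =====
-- def _max_cant_personas_mesa(P, W, sol_parcial): # Aprox
--     if len(P) == 0:
--         return sum(sol_parcial)
--     if P[0] <= W:
--         sol_parcial.append(P[0])
--         con = _max_cant_personas_mesa(P[1:], W-P[0], sol_parcial)
--         sol_parcial.pop()
--         sin = _max_cant_personas_mesa(P[1:], W, sol_parcial)
--         return max(con, sin)
--     return _max_cant_personas_mesa(P[1:], W, sol_parcial)
-- ===== SOURCE B (Python) =====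
-- def _max_cant_personas_mesa(P, W, sol_parcial):
--     sums = {0}
--     for x in P:
--         sums |= {s + x for s in sums if x <= W - s}
--     return sum(sol_parcial) + max(sums)
-- ===== Notes on version B (the rewrite author's own statement) =====
-- stated objective: faster
-- what changed: Replaced the exponential include/exclude recursion by an iterative reachable-sums dynamic programming: one left-to-right pass maintaining the set of achievable used capacities, returning sum(sol_parcial) plus the maximum reachable sum.
import Mathlib
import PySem

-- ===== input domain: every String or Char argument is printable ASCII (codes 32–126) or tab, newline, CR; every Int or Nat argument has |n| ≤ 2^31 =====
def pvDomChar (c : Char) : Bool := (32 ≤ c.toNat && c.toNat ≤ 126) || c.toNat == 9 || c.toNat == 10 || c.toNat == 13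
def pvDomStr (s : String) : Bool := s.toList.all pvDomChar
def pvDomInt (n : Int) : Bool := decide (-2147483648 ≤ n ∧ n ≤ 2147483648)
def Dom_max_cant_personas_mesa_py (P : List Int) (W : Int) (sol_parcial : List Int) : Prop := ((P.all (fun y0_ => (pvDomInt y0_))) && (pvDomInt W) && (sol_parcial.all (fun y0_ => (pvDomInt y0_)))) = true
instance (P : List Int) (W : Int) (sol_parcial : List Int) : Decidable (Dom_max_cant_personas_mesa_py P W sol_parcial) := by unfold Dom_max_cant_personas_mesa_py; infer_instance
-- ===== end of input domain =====

-- B replaces A's exponential include/exclude recursion by an iterative reachable-sums DP (faster);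
-- A appends to and pops from sol_parcial during the recursion but restores it before returning,
-- so the equivalence is about the return value (A's net mutation is nil).

-- ===== PORT A =====
def max_cant_personas_mesa_py (P : List Int) (W : Int) (sol_parcial : List Int) : Int :=
  match P with
  | [] => sol_parcial.foldl (· + ·) 0              -- sum(sol_parcial)
  | p :: rest =>                                   -- P[0] = p, P[1:] = rest
    if p ≤ W then
      -- sol_parcial.append(P[0]); con = rec; sol_parcial.pop(); sin = rec
      let con := max_cant_personas_mesa_py rest (W - p) (sol_parcial ++ [p])
      let sin := max_cant_personas_mesa_py rest W sol_parcial
      max con sin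
    else
      max_cant_personas_mesa_py rest W sol_parcial

-- ===== PORT B =====
-- sums |= {s + x for s in sums if x <= W - s}
def pvStep (W : Int) (sums : PySem.Set Int) (x : Int) : PySem.Set Int :=
  PySem.Set.union sums
    (PySem.Set.ofList ((sums.filter (fun s => decide (x ≤ W - s))).map (fun s => s + x)))

def max_cant_personas_mesa_py_alt (P : List Int) (W : Int) (sol_parcial : List Int) : Int :=
  let sums : PySem.Set Int := PySem.Set.ofList [0]
  let sums := P.foldl (pvStep W) sums
  -- max(sums): sums always contains 0, so it is nonempty and the default of getD is never used
  sol_parcial.foldl (· + ·) 0 + (PySem.List.max? sums (fun y => y)).getD 0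

-- ===== PRECONDITION & SPEC =====
def Spec_max_cant_personas_mesa_py (P : List Int) (W : Int) (sol_parcial : List Int) (out : Int) : Prop := out = max_cant_personas_mesa_py_alt P W sol_parcial
instance (P : List Int) (W : Int) (sol_parcial : List Int) (out : Int) : Decidable (Spec_max_cant_personas_mesa_py P W sol_parcial out) := by unfold Spec_max_cant_personas_mesa_py; infer_instance

-- ===== CLAIM (what is proved, stated in full; the proofs are below) =====
def Claim_equal_max_cant_personas_mesa_py : Prop := ∀ (P : List Int) (W : Int) (sol_parcial : List Int), Dom_max_cant_personas_mesa_py P W sol_parcial → Spec_max_cant_personas_mesa_py P W sol_parcial (max_cant_personas_mesa_py P W sol_parcial)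

-- ===== LEMMAS AND PROOFS =====

-- The value of A without the sol_parcial offset.
def gAux : List Int → Int → Int
  | [], _ => 0
  | p :: rest, W => if p ≤ W then max (p + gAux rest (W - p)) (gAux rest W) else gAux rest W

lemma foldl_add_append_singleton (sp : List Int) (p : Int) :
    (sp ++ [p]).foldl (· + ·) 0 = sp.foldl (· + ·) 0 + p := by
  simp [List.foldl_append]

lemma a_eq_gAux (P : List Int) (W : Int) (sp : List Int) :
    max_cant_personas_mesa_py P W sp = sp.foldl (· + ·) 0 + gAux P W := by
  induction P generalizing W sp with
  | nil => simp [max_cant_personas_mesa_py, gAux]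
  | cons p rest ih =>
    simp only [max_cant_personas_mesa_py, gAux]
    split_ifs with h
    · rw [ih, ih, foldl_add_append_singleton, add_assoc, max_add_add_left]
    · exact ih W sp

lemma gAux_le_cons (p : Int) (rest : List Int) (W : Int) :
    gAux rest W ≤ gAux (p :: rest) W := by
  simp only [gAux]
  split_ifs with h
  · exact le_max_right _ _
  · exact le_refl _

lemma mem_pvStep {t : Int} (W x : Int) (S : PySem.Set Int) :
    t ∈ pvStep W S x ↔ t ∈ S ∨ ∃ s ∈ S, x ≤ W - s ∧ t = s + x := by
  simp only [pvStep, PySem.Set.mem_union, PySem.Set.mem_ofList, List.mem_map, List.mem_filter,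
    decide_eq_true_eq]
  constructor
  · rintro (h | ⟨a, ⟨ha, hx⟩, rfl⟩)
    exacts [Or.inl h, Or.inr ⟨a, ha, hx, rfl⟩]
  · rintro (h | ⟨s, hs, hx, rfl⟩)
    exacts [Or.inl h, Or.inr ⟨s, ⟨hs, hx⟩, rfl⟩]

lemma pvStep_ne_nil {S : PySem.Set Int} (hS : S ≠ []) (W x : Int) :
    pvStep W S x ≠ [] := by
  obtain ⟨s, hs⟩ := List.exists_mem_of_ne_nil S hS
  have : s ∈ pvStep W S x := (mem_pvStep W x S).2 (Or.inl hs)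
  exact List.ne_nil_of_mem this

lemma max?_id_eq_of_forall (L1 L2 : List Int) (h1 : L1 ≠ [])
    (h12 : ∀ a ∈ L1, ∃ b ∈ L2, a ≤ b) (h21 : ∀ b ∈ L2, ∃ a ∈ L1, b ≤ a) :
    PySem.List.max? L1 (fun y => y) = PySem.List.max? L2 (fun y => y) := by
  obtain ⟨a0, ha0⟩ := List.exists_mem_of_ne_nil L1 h1
  obtain ⟨b0, hb0, _⟩ := h12 a0 ha0
  have h2 : L2 ≠ [] := List.ne_nil_of_mem hb0
  cases hm1 : PySem.List.max? L1 (fun y => y) with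
  | none => exact absurd ((PySem.List.max?_eq_none_iff _ _).1 hm1) h1
  | some m1 =>
    cases hm2 : PySem.List.max? L2 (fun y => y) with
    | none => exact absurd ((PySem.List.max?_eq_none_iff _ _).1 hm2) h2
    | some m2 =>
      have hm1mem := PySem.List.max?_mem hm1
      have hm2mem := PySem.List.max?_mem hm2
      obtain ⟨b, hb, hab⟩ := h12 m1 hm1mem
      obtain ⟨a, ha, hba⟩ := h21 m2 hm2mem
      have hle1 : m1 ≤ m2 := le_trans hab (PySem.List.max?_isMax hm2 b hb)
      have hle2 : m2 ≤ m1 := le_trans hba (PySem.List.max?_isMax hm1 a ha)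
      rw [le_antisymm hle1 hle2]

lemma key_lemma (P : List Int) (W : Int) :
    ∀ (S : PySem.Set Int), S ≠ [] →
      PySem.List.max? (P.foldl (pvStep W) S) (fun y => y) =
      PySem.List.max? (S.map (fun s => s + gAux P (W - s))) (fun y => y) := by
  induction P with
  | nil =>
    intro S hS
    simp [gAux]
  | cons p rest ih =>
    intro S hS
    have hS' := pvStep_ne_nil hS W p
    rw [List.foldl_cons, ih _ hS']
    apply max?_id_eq_of_forall
    · simpa using hS'
    · intro a ha
      obtain ⟨t, ht, rfl⟩ := List.mem_map.1 ha
      rcases (mem_pvStep W p S).1 ht with hts | ⟨s, hs, hps, rfl⟩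
      · exact ⟨t + gAux (p :: rest) (W - t), List.mem_map.2 ⟨t, hts, rfl⟩,
          by have := gAux_le_cons p rest (W - t); omega⟩
      · refine ⟨s + gAux (p :: rest) (W - s), List.mem_map.2 ⟨s, hs, rfl⟩, ?_⟩
        have : gAux (p :: rest) (W - s) = max (p + gAux rest (W - s - p)) (gAux rest (W - s)) := by
          simp [gAux, hps]
        rw [this]
        have : W - (s + p) = W - s - p := by ring
        rw [this]
        have := le_max_left (p + gAux rest (W - s - p)) (gAux rest (W - s))
        omega
    · intro b hb
      obtain ⟨s, hs, rfl⟩ := List.mem_map.1 hb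
      by_cases hp : p ≤ W - s
      · have hg : gAux (p :: rest) (W - s) = max (p + gAux rest (W - s - p)) (gAux rest (W - s)) := by
          simp [gAux, hp]
        rcases le_total (p + gAux rest (W - s - p)) (gAux rest (W - s)) with hc | hc
        · refine ⟨s + gAux rest (W - s), List.mem_map.2
            ⟨s, (mem_pvStep W p S).2 (Or.inl hs), rfl⟩, ?_⟩
          rw [hg, max_eq_right hc]
        · refine ⟨(s + p) + gAux rest (W - (s + p)), List.mem_map.2
            ⟨s + p, (mem_pvStep W p S).2 (Or.inr ⟨s, hs, hp, rfl⟩), rfl⟩, ?_⟩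
          rw [hg, max_eq_left hc]
          have : W - (s + p) = W - s - p := by ring
          rw [this]; omega
      · have hg : gAux (p :: rest) (W - s) = gAux rest (W - s) := by
          simp [gAux, hp]
        exact ⟨s + gAux rest (W - s), List.mem_map.2
          ⟨s, (mem_pvStep W p S).2 (Or.inl hs), rfl⟩, le_of_eq (by rw [hg])⟩

lemma alt_eq_gAux (P : List Int) (W : Int) (sp : List Int) :
    max_cant_personas_mesa_py_alt P W sp = sp.foldl (· + ·) 0 + gAux P W := by
  have h0 : PySem.Set.ofList [0] = ([0] : List Int) := by decide
  simp only [max_cant_personas_mesa_py_alt, h0]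
  rw [key_lemma P W [0] (by simp)]
  simp [PySem.List.max?]

-- ===== VERDICT (by name: the statement is the Claim_ definition above) =====
theorem max_cant_personas_mesa_py_spec : Claim_equal_max_cant_personas_mesa_py := by
  intro P W sp _
  unfold Spec_max_cant_personas_mesa_py
  rw [a_eq_gAux, alt_eq_gAux]
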